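-- pv_equiv track=rewrite | github.com/Sullenday/App | app/container_ocr.py | _merge_vertical_bands
-- ===== SOURCE A (Python) =====
-- def _merge_vertical_bands(bands: list[tuple[int, int]], max_gap: int) -> list[tuple[int, int]]:
--     if not bands:
--         return []
--     merged = [bands[0]]
--     for start, end in bands[1:]:
--         prev_start, prev_end = merged[-1]
--         if start - prev_end <= max_gap:
--             merged[-1] = (prev_start, end)
--         else:
--             merged.append((start, end))
--     return merged
-- ===== SOURCE B (Python) =====
-- def _merge_vertical_bands(bands: list[tuple[int, int]], max_gap: int) -> list[tuple[int, int]]: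
--     n = len(bands)
--     if n == 0:
--         return []
--     # pass 1: indices where a new group starts (gap to the previous band too large)
--     cuts = [i for i in range(1, n) if bands[i][0] - bands[i - 1][1] > max_gap]
--     # pass 2: one output pair per contiguous segment [a, b)
--     bounds = [0] + cuts + [n]
--     return [(bands[a][0], bands[b - 1][1]) for a, b in zip(bounds, bounds[1:])]
-- ===== Notes on version B (the rewrite author's own statement) =====
-- stated objective: alternative
-- what changed: Replaces A's single running-merge sweep (which repeatedly overwrites the last element of an accumulator list) by a staged two-pass computation: pass 1 collects the split indices i with bands[i][0]-bands[i-1][1] > max_gap, pass 2 zips the resulting segment bounds and emits one (first start, last end) pair per contiguous segment.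
import Mathlib
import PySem

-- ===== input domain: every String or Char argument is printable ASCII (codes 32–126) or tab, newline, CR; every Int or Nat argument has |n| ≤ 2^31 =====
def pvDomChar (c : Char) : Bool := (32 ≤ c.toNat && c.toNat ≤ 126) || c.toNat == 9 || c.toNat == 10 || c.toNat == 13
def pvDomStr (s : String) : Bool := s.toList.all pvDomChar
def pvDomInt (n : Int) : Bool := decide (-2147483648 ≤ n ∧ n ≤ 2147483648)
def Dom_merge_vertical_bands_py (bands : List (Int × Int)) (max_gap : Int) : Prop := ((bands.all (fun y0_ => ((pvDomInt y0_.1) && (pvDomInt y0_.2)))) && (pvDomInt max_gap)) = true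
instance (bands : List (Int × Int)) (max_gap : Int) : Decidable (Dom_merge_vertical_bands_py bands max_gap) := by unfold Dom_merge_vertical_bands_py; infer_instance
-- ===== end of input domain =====

-- B replaces A's running merge (which keeps overwriting the last accumulator entry) by a staged
-- two-pass computation: first collect the split indices, then map each contiguous segment to one
-- output pair (objective: alternative decomposition, same cost).

-- ===== PORT A =====
-- A's loop body: the accumulator is kept REVERSED (head = merged[-1]); the final result is reversed back.
def mergeStepA (max_gap : Int) (acc : List (Int × Int)) (b : Int × Int) : List (Int × Int) :=
  match acc with
  | (prev_start, prev_end) :: t =>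
      if b.1 - prev_end ≤ max_gap then (prev_start, b.2) :: t
      else (b.1, b.2) :: (prev_start, prev_end) :: t
  | [] => [(b.1, b.2)]  -- unreachable: acc starts nonempty and never shrinks

def merge_vertical_bands_py (bands : List (Int × Int)) (max_gap : Int) : List (Int × Int) :=
  match bands with
  | [] => []
  | b :: rest => (rest.foldl (mergeStepA max_gap) [b]).reverse

-- ===== PORT B =====
-- bands[i]: every index B computes lies in range, so the default of pyGetD is never used (exact).
def pyAtB (bands : List (Int × Int)) (i : Int) : Int × Int := PySem.List.pyGetD bands i (0, 0)

def merge_vertical_bands_py_alt (bands : List (Int × Int)) (max_gap : Int) : List (Int × Int) :=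
  let n : Int := PySem.List.len bands
  if n = 0 then []
  else
    -- pass 1: indices where a new group starts (gap to the previous band too large)
    let cuts : List Int := (PySem.List.pyRange 1 n 1).filter
      (fun i => decide ((pyAtB bands i).1 - (pyAtB bands (i - 1)).2 > max_gap))
    -- pass 2: one output pair per contiguous segment (zip(bounds, bounds[1:]))
    let bounds : List Int := 0 :: (cuts ++ [n])
    (bounds.zip (cuts ++ [n])).map (fun ab => ((pyAtB bands ab.1).1, (pyAtB bands (ab.2 - 1)).2))

-- ===== PRECONDITION & SPEC =====
def Spec_merge_vertical_bands_py (bands : List (Int × Int)) (max_gap : Int) (out : List (Int × Int)) : Prop := out = merge_vertical_bands_py_alt bands max_gap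
instance (bands : List (Int × Int)) (max_gap : Int) (out : List (Int × Int)) : Decidable (Spec_merge_vertical_bands_py bands max_gap out) := by unfold Spec_merge_vertical_bands_py; infer_instance

-- ===== CLAIM (what is proved, stated in full; the proofs are below) =====
def Claim_equal_merge_vertical_bands_py : Prop := ∀ (bands : List (Int × Int)) (max_gap : Int), Dom_merge_vertical_bands_py bands max_gap → Spec_merge_vertical_bands_py bands max_gap (merge_vertical_bands_py bands max_gap)

-- ===== LEMMAS AND PROOFS =====

-- Common normal form: one group at a time. spanGroup walks the current group (next start within
-- max_gap of the current raw end) and returns the group's final end plus the remaining bands.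
def spanGroup (max_gap : Int) (e : Int) : List (Int × Int) → Int × List (Int × Int)
  | [] => (e, [])
  | (s2, e2) :: rest => if s2 - e ≤ max_gap then spanGroup max_gap e2 rest else (e, (s2, e2) :: rest)

theorem spanGroup_len (max_gap e : Int) : ∀ (l : List (Int × Int)), (spanGroup max_gap e l).2.length ≤ l.length := by
  intro l
  induction l generalizing e with
  | nil => simp [spanGroup]
  | cons h t ih =>
      obtain ⟨s2, e2⟩ := h
      simp only [spanGroup]
      split
      · exact Nat.le_trans (ih e2) (Nat.le_succ _)
      · simp

def mergeM (bands : List (Int × Int)) (max_gap : Int) : List (Int × Int) :=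
  match bands with
  | [] => []
  | (s, e) :: rest =>
      let p := spanGroup max_gap e rest
      (s, p.1) :: mergeM p.2 max_gap
termination_by bands.length
decreasing_by
  simp only [List.length_cons]
  exact Nat.lt_succ_of_le (spanGroup_len max_gap e rest)

-- ---- A = mergeM ----
-- Invariant of A's fold: with a nonempty reversed accumulator (ps,pe)::t, the reversed result is
-- t reversed, then the current group closed off by spanGroup, then mergeM on the rest.
theorem foldA_eq_M (max_gap : Int) :
    ∀ (rest : List (Int × Int)) (ps pe : Int) (t : List (Int × Int)),
      (rest.foldl (mergeStepA max_gap) ((ps, pe) :: t)).reverse =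
        t.reverse ++ (ps, (spanGroup max_gap pe rest).1) ::
          mergeM (spanGroup max_gap pe rest).2 max_gap := by
  intro rest
  induction rest with
  | nil =>
      intro ps pe t
      simp [spanGroup, mergeM]
  | cons h r ih =>
      intro ps pe t
      obtain ⟨s2, e2⟩ := h
      by_cases hg : s2 - pe ≤ max_gap
      · simp only [List.foldl_cons, mergeStepA, hg, if_pos, spanGroup]
        exact ih ps e2 t
      · simp only [List.foldl_cons, mergeStepA, spanGroup]
        rw [if_neg hg, if_neg hg]
        rw [ih s2 e2 ((ps, pe) :: t)]
        rw [mergeM]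
        simp

-- ---- B = mergeM ----
-- Nat-level shadows of B's two passes over a fixed original list.
def gapB (bands : List (Int × Int)) (max_gap : Int) (i : Nat) : Bool :=
  decide ((bands.getD i (0, 0)).1 - (bands.getD (i - 1) (0, 0)).2 > max_gap)

def cutsN (bands : List (Int × Int)) (max_gap : Int) (m : Nat) : List Nat :=
  (List.range' (m + 1) (bands.length - 1 - m)).filter (gapB bands max_gap)

def segF (bands : List (Int × Int)) (ab : Nat × Nat) : Int × Int :=
  ((bands.getD ab.1 (0, 0)).1, (bands.getD (ab.2 - 1) (0, 0)).2)

def segsN (bands : List (Int × Int)) (max_gap : Int) (m : Nat) : List (Int × Int) :=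
  ((m :: (cutsN bands max_gap m ++ [bands.length])).zip
      (cutsN bands max_gap m ++ [bands.length])).map (segF bands)

-- spanGroup, read on the suffix bands.drop (m+1), finds the first split index c after m.
theorem span_char (bands : List (Int × Int)) (max_gap : Int) :
    ∀ (k m : Nat), bands.length - m ≤ k → m < bands.length →
    ∃ c : Nat, m < c ∧ c ≤ bands.length ∧
      spanGroup max_gap (bands.getD m (0, 0)).2 (bands.drop (m + 1)) =
        ((bands.getD (c - 1) (0, 0)).2, bands.drop c) ∧
      (∀ i, m < i → i < c → gapB bands max_gap i = false) ∧
      (c < bands.length → gapB bands max_gap c = true) := by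
  intro k
  induction k with
  | zero => intro m hk hm; omega
  | succ k ih =>
      intro m hk hm
      by_cases hend : m + 1 < bands.length
      · have hdrop : bands.drop (m + 1) = bands[m + 1] :: bands.drop (m + 2) :=
          List.drop_eq_getElem_cons hend
        by_cases hg : (bands[m + 1]'hend).1 - (bands.getD m (0, 0)).2 ≤ max_gap
        · obtain ⟨c, hc1, hc2, hc3, hc4, hc5⟩ := ih (m + 1) (by omega) hend
          refine ⟨c, by omega, hc2, ?_, ?_, hc5⟩
          · rw [hdrop]
            have : spanGroup max_gap (bands.getD m (0, 0)).2 (bands[m + 1] :: bands.drop (m + 2)) =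
                spanGroup max_gap (bands[m + 1]'hend).2 (bands.drop (m + 2)) := by
              simp only [spanGroup, List.get_eq_getElem]
              rw [if_pos hg]
            rw [this]
            rw [List.getD_eq_getElem bands (0, 0) hend] at hc3
            exact hc3
          · intro i hi1 hi2
            rcases Nat.lt_or_ge (m + 1) i with h | h
            · exact hc4 i h hi2
            · have : i = m + 1 := by omega
              subst this
              simp only [gapB, decide_eq_false_iff_not, not_lt]
              rw [List.getD_eq_getElem bands (0, 0) hend]
              simpa using hg
        · refine ⟨m + 1, by omega, by omega, ?_, by omega, ?_⟩
          · rw [hdrop]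
            simp only [spanGroup, List.get_eq_getElem]
            rw [if_neg hg, ← hdrop]
            simp
          · intro _
            simp only [gapB, decide_eq_true_eq, Nat.add_sub_cancel]
            rw [List.getD_eq_getElem bands (0, 0) hend]
            omega
      · have hm1 : m + 1 = bands.length := by omega
        refine ⟨m + 1, by omega, by omega, ?_, by omega, by omega⟩
        rw [List.drop_of_length_le (by omega)]
        simp [spanGroup]

-- the cut list after m is the first split c followed by the cut list after c
theorem cutsN_eq (bands : List (Int × Int)) (max_gap : Int) (m c : Nat)
    (hmc : m < c) (hcn : c ≤ bands.length)
    (hno : ∀ i, m < i → i < c → gapB bands max_gap i = false)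
    (hyes : c < bands.length → gapB bands max_gap c = true) :
    cutsN bands max_gap m = if c < bands.length then c :: cutsN bands max_gap c else [] := by
  have hsplit : List.range' (m + 1) (bands.length - 1 - m) =
      List.range' (m + 1) (c - 1 - m) ++ List.range' c (bands.length - c) := by
    have h1 : m + 1 + (c - 1 - m) = c := by omega
    have h2 : (c - 1 - m) + (bands.length - c) = bands.length - 1 - m := by omega
    rw [← h2, ← List.range'_append_1, h1]
  unfold cutsN
  rw [hsplit, List.filter_append]
  have hleft : (List.range' (m + 1) (c - 1 - m)).filter (gapB bands max_gap) = [] := by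
    rw [List.filter_eq_nil_iff]
    intro i hi
    rw [List.mem_range'_1] at hi
    simp [hno i (by omega) (by omega)]
  rw [hleft, List.nil_append]
  by_cases hc : c < bands.length
  · rw [if_pos hc]
    have : bands.length - c = (bands.length - 1 - c) + 1 := by omega
    rw [this, List.range'_succ, List.filter_cons]
    rw [hyes hc]
    simp
  · have : bands.length - c = 0 := by omega
    rw [this, if_neg hc]
    simp

-- B's segment map, started at any m < length, equals mergeM on the suffix
theorem segsN_eq_M (bands : List (Int × Int)) (max_gap : Int) :
    ∀ (k m : Nat), bands.length - m ≤ k → m < bands.length →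
      segsN bands max_gap m = mergeM (bands.drop m) max_gap := by
  intro k
  induction k with
  | zero => intro m hk hm; omega
  | succ k ih =>
      intro m hk hm
      obtain ⟨c, hc1, hc2, hc3, hc4, hc5⟩ := span_char bands max_gap (bands.length - m) m le_rfl hm
      have hdropm : bands.drop m = bands[m] :: bands.drop (m + 1) := List.drop_eq_getElem_cons hm
      have hM : mergeM (bands.drop m) max_gap =
          ((bands[m]'hm).1, (bands.getD (c - 1) (0, 0)).2) :: mergeM (bands.drop c) max_gap := by
        rw [hdropm]
        rw [mergeM]
        have hb : (bands[m]'hm) = ((bands[m]'hm).1, (bands[m]'hm).2) := rfl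
        rw [List.getD_eq_getElem bands (0, 0) hm] at hc3
        simp only [hc3]
      have hcuts := cutsN_eq bands max_gap m c hc1 hc2 hc4 hc5
      by_cases hc : c < bands.length
      · rw [if_pos hc] at hcuts
        have hsegs : segsN bands max_gap m =
            segF bands (m, c) :: segsN bands max_gap c := by
          unfold segsN
          rw [hcuts]
          simp [List.zip_cons_cons]
        rw [hsegs, hM]
        congr 1
        · simp [segF, List.getElem?_eq_getElem hm]
        · exact ih c (by omega) hc
      · rw [if_neg hc] at hcuts
        have hcn : c = bands.length := by omega
        have hsegs : segsN bands max_gap m = [segF bands (m, bands.length)] := by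
          unfold segsN
          rw [hcuts]
          simp [List.zip_cons_cons]
        rw [hsegs, hM, hcn]
        rw [List.drop_length]
        rw [mergeM]
        simp [segF, List.getElem?_eq_getElem hm]

-- bridge: B's Int-indexed passes are the Nat-level passes started at 0
theorem alt_eq_segsN (bands : List (Int × Int)) (max_gap : Int) (hne : bands ≠ []) :
    merge_vertical_bands_py_alt bands max_gap = segsN bands max_gap 0 := by
  have hlen : bands.length ≠ 0 := by simpa using hne
  unfold merge_vertical_bands_py_alt
  simp only [PySem.List.len_eq]
  rw [if_neg (by exact_mod_cast hlen)]
  have hr : PySem.List.pyRange 1 (bands.length : Int) 1 =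
      (List.range' 1 (bands.length - 1)).map (fun i : Nat => (i : Int)) := by
    rw [PySem.List.pyRange_one, List.range'_eq_map_range, List.map_map]
    have : ((bands.length : Int) - 1).toNat = bands.length - 1 := by omega
    rw [this]
    apply List.map_congr_left
    intro k _
    simp
  have hcuts : (PySem.List.pyRange 1 (bands.length : Int) 1).filter
      (fun i => decide ((pyAtB bands i).1 - (pyAtB bands (i - 1)).2 > max_gap)) =
      (cutsN bands max_gap 0).map (fun i : Nat => (i : Int)) := by
    rw [hr, List.filter_map]
    unfold cutsN
    congr 1
    apply List.filter_congr
    intro i hi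
    rw [List.mem_range'_1] at hi
    have h1 : (1 : Nat) ≤ i := hi.1
    simp only [Function.comp, pyAtB, gapB]
    have hcast : ((i : Int) - 1) = ((i - 1 : Nat) : Int) := by omega
    rw [hcast]
    simp [PySem.List.pyGetD_natCast]
  rw [hcuts]
  have hmapb : (0 : Int) :: ((cutsN bands max_gap 0).map (fun i : Nat => (i : Int)) ++ [(bands.length : Int)]) =
      ((0 : Nat) :: (cutsN bands max_gap 0 ++ [bands.length])).map (fun i : Nat => (i : Int)) := by
    simp
  have hmapt : (cutsN bands max_gap 0).map (fun i : Nat => (i : Int)) ++ [(bands.length : Int)] =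
      (cutsN bands max_gap 0 ++ [bands.length]).map (fun i : Nat => (i : Int)) := by
    simp
  rw [hmapb, hmapt, List.zip_map, List.map_map]
  unfold segsN
  apply List.map_congr_left
  intro ab hab
  have hb2 : 1 ≤ ab.2 := by
    have h2 := (List.of_mem_zip hab).2
    rcases List.mem_append.1 h2 with h | h
    · have := List.mem_range'_1.1 (List.mem_of_mem_filter h)
      omega
    · simp at h
      omega
  obtain ⟨a, b⟩ := ab
  simp only [Function.comp, Prod.map, pyAtB, segF]
  have hcast : ((b : Int) - 1) = ((b - 1 : Nat) : Int) := by
    simp at hb2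
    omega
  rw [hcast]
  simp [PySem.List.pyGetD_natCast]

-- ===== VERDICT (by name: the statement is the Claim_ definition above) =====
theorem merge_vertical_bands_py_spec : Claim_equal_merge_vertical_bands_py := by
  intro bands max_gap _
  unfold Spec_merge_vertical_bands_py
  match hb : bands with
  | [] => rw [merge_vertical_bands_py_alt]; rfl
  | (s, e) :: rest =>
      have hA : merge_vertical_bands_py ((s, e) :: rest) max_gap = mergeM ((s, e) :: rest) max_gap := by
        show (rest.foldl (mergeStepA max_gap) [(s, e)]).reverse = _
        rw [foldA_eq_M max_gap rest s e []]
        rw [mergeM]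
        simp
      have hB : merge_vertical_bands_py_alt ((s, e) :: rest) max_gap = mergeM ((s, e) :: rest) max_gap := by
        rw [alt_eq_segsN _ _ (by simp)]
        have := segsN_eq_M ((s, e) :: rest) max_gap ((s, e) :: rest).length 0 (by omega) (by simp)
        simpa using this
      rw [hA, hB]
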